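-- pv_equiv track=rewrite | github.com/elenaouro/CDI-Compression-of-Data-and-Images- | 01_P_Desigualdad_Kraft-McMillan.py | kraft2
-- ===== SOURCE A (Python) =====
-- def  kraft2(L, r=2):
-- 	sum=0
-- 	cont=0
-- 	for i in L:
-- 		if(i!=max(L)):
-- 			aux=max(L)-i
-- 			sum=sum+(2**aux)
-- 		else: cont=cont+1
-- 	res= (2**max(L))-sum
-- 	return res-cont
-- ===== SOURCE B (Python) =====
-- def kraft2(L, r=2):
--     # Sort the lengths once, then a Horner-style scan over consecutive gaps:
--     # w accumulates sum(2**(max-l) for l in L) using only small shifts,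
--     # never recomputing max and never raising 2 to a per-element exponent.
--     s = sorted(L)
--     w = 0
--     prev = s[0]
--     for l in s:
--         w = (w << (l - prev)) + 1
--         prev = l
--     return (1 << s[-1]) - w
-- ===== Notes on version B (the rewrite author's own statement) =====
-- stated objective: faster
-- what changed: A rescans L to recompute max(L) for every element and raises 2 to a per-element exponent; B sorts the lengths once and runs a Horner-style scan over consecutive gaps (w = (w << (l - prev)) + 1), obtaining 2**max - sum(2**(max-l)) with only small shifts and no max calls.
-- outside the precondition, e.g. on kraft2([-1], 2): A returns -0.5, B raises ValueError; on kraft2([], 2): A raises ValueError, B raises IndexError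
import Mathlib
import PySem

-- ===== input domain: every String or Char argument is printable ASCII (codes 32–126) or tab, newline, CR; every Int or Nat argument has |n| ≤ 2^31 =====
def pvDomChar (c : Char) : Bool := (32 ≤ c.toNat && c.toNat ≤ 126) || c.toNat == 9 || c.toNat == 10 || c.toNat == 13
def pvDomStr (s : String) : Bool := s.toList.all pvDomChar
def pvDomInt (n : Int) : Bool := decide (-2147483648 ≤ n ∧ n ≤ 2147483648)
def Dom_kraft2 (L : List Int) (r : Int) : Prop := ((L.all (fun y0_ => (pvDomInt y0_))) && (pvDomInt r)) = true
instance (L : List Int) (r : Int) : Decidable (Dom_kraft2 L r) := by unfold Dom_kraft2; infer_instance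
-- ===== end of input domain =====

-- B replaces A's loop (which rescans L for max(L) at every element and raises 2 to a
-- per-element exponent) by one sort followed by a Horner-style scan over consecutive gaps;
-- same return value on Pre_.

-- ===== PORT A =====
-- max(L) is recomputed inside the loop, as in A's Python source.
def kraft2 (L : List Int) (r : Int) : Int :=
  let st := L.foldl (fun (st : Int × Int) i =>
    let m := (PySem.List.max? L (fun y => y)).getD 0
    if i ≠ m then (st.1 + 2 ^ ((m - i).toNat), st.2)
    else (st.1, st.2 + 1)) (0, 0)
  let m := (PySem.List.max? L (fun y => y)).getD 0
  (2 ^ m.toNat - st.1) - st.2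

-- ===== PORT B =====
-- Python's 'w << (l - prev)' is w * 2^(l - prev): the shift amount is nonnegative on the
-- sorted list, so '.toNat' is exact; s[0] and s[-1] are PySem.List.pyGet? (getD 0 is never
-- taken under Pre_, which makes s nonempty).
def kraft2_alt (L : List Int) (r : Int) : Int :=
  let s := PySem.List.sorted L (fun y => y) false
  let st := s.foldl (fun (st : Int × Int) l => (st.1 * 2 ^ ((l - st.2).toNat) + 1, l))
    (0, (PySem.List.pyGet? s 0).getD 0)
  2 ^ (((PySem.List.pyGet? s (-1)).getD 0).toNat) - st.1

-- ===== PRECONDITION & SPEC =====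
-- Pre_ excludes the empty list (A's max([]) raises ValueError, B's s[0] raises IndexError)
-- and lists whose maximum is negative, where A's 2**max(L) returns a float rather than an
-- int (and B's 1 << s[-1] raises ValueError).
def Pre_kraft2 (L : List Int) (r : Int) : Prop := ∃ x ∈ L, 0 ≤ x
instance (L : List Int) (r : Int) : Decidable (Pre_kraft2 L r) := by unfold Pre_kraft2; infer_instance
def pvWitness_kraft2 : List Int × Int := ([1, 2, 2, 3], 2)

def Spec_kraft2 (L : List Int) (r : Int) (out : Int) : Prop := out = kraft2_alt L r
instance (L : List Int) (r : Int) (out : Int) : Decidable (Spec_kraft2 L r out) := by unfold Spec_kraft2; infer_instance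

-- ===== CLAIM (what is proved, stated in full; the proofs are below) =====
def Claim_equal_kraft2 : Prop := ∀ (L : List Int) (r : Int), Dom_kraft2 L r → Pre_kraft2 L r → Spec_kraft2 L r (kraft2 L r)

-- ===== LEMMAS AND PROOFS =====

-- A's running sum plus its max-multiplicity counter together accumulate 2^(m-i) over all i
-- (for i = m the else-branch adds 1 = 2^(m-m)).
theorem kraft2_fold_sum (m : Int) :
    ∀ (l : List Int) (s c : Int),
      (l.foldl (fun (st : Int × Int) i =>
          if i ≠ m then (st.1 + 2 ^ ((m - i).toNat), st.2)
          else (st.1, st.2 + 1)) (s, c)).1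
      + (l.foldl (fun (st : Int × Int) i =>
          if i ≠ m then (st.1 + 2 ^ ((m - i).toNat), st.2)
          else (st.1, st.2 + 1)) (s, c)).2
      = s + c + (l.map (fun i => (2 : Int) ^ ((m - i).toNat))).sum := by
  intro l
  induction l with
  | nil => intro s c; simp
  | cons a t ih =>
    intro s c
    by_cases ha : a = m
    · have hstep : (if a ≠ m then (s + 2 ^ ((m - a).toNat), c) else (s, c + 1)) = (s, c + 1) := by
        simp [ha]
      simp only [List.foldl_cons, hstep, List.map_cons, List.sum_cons]
      rw [ih, ha]
      simp
      ring
    · simp only [List.foldl_cons, if_pos ha, List.map_cons, List.sum_cons]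
      rw [ih]
      ring

-- s[-1] of a nonempty list is its last element
theorem pyGetD_neg_one (l : List Int) (h : l ≠ []) :
    (PySem.List.pyGet? l (-1)).getD 0 = l.getLast h := by
  cases l with
  | nil => exact absurd rfl h
  | cons a t =>
    simp [PySem.List.pyGet?, PySem.List.pyIdx?, List.getLast_eq_getElem]
    rfl

-- in a ≤-sorted list every element is at most the last one
theorem pairwise_le_getLast :
    ∀ (l : List Int) (h : l ≠ []), l.Pairwise (· ≤ ·) → ∀ x ∈ l, x ≤ l.getLast h := by
  intro l
  induction l with
  | nil => intro h; exact absurd rfl h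
  | cons a t ih =>
    intro _ hp x hx
    rcases List.pairwise_cons.mp hp with ⟨ha, hpt⟩
    cases t with
    | nil => simp at hx; simp [hx]
    | cons b u =>
      rw [List.getLast_cons (by simp)]
      rcases List.mem_cons.mp hx with h | h
      · subst h
        exact le_trans (ha b (by simp)) (ih (by simp) hpt b (by simp))
      · exact ih (by simp) hpt x h

-- B's Horner scan: over a sorted chunk starting at p, the accumulator scales the carried-in
-- value to the last element's level and adds 2^(last - i) for every element i.
theorem kraft2_alt_fold :
    ∀ (t : List Int) (w p : Int) (ht : t ≠ []), t.Pairwise (· ≤ ·) → (∀ x ∈ t, p ≤ x) →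
      (t.foldl (fun (st : Int × Int) l => (st.1 * 2 ^ ((l - st.2).toNat) + 1, l)) (w, p))
      = (w * 2 ^ ((t.getLast ht - p).toNat)
          + (t.map (fun i => (2 : Int) ^ ((t.getLast ht - i).toNat))).sum, t.getLast ht) := by
  intro t
  induction t with
  | nil => intro w p ht; exact absurd rfl ht
  | cons a t ih =>
    intro w p _ hp hge
    rcases List.pairwise_cons.mp hp with ⟨ha, hpt⟩
    cases t with
    | nil => simp
    | cons b u =>
      have hne : (b :: u) ≠ [] := by simp
      rw [List.getLast_cons hne, List.foldl_cons,
        ih (w * 2 ^ ((a - p).toNat) + 1) a hne hpt ha]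
      have halast : a ≤ (b :: u).getLast hne :=
        le_trans (ha b (by simp)) (pairwise_le_getLast _ hne hpt b (by simp))
      have hpa : p ≤ a := hge a (by simp)
      have hpow : (2 : Int) ^ ((a - p).toNat) * 2 ^ (((b :: u).getLast hne - a).toNat)
          = 2 ^ (((b :: u).getLast hne - p).toNat) := by
        rw [← pow_add]
        congr 1
        omega
      rw [Prod.mk.injEq]
      refine ⟨?_, rfl⟩
      simp only [List.map_cons, List.sum_cons]
      linear_combination w * hpow

-- ===== VERDICT (by name: the statement is the Claim_ definition above) =====
theorem kraft2_spec : Claim_equal_kraft2 := by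
  intro L r _ hpre
  unfold Spec_kraft2 kraft2 kraft2_alt
  obtain ⟨x, hxL, _⟩ := hpre
  have hLne : L ≠ [] := by intro h; subst h; exact absurd hxL (List.not_mem_nil)
  obtain ⟨m, hm⟩ : ∃ m, PySem.List.max? L (fun y => y) = some m := by
    cases h : PySem.List.max? L (fun y => y) with
    | none => exact absurd ((PySem.List.max?_eq_none_iff L (fun y => y)).mp h) hLne
    | some m => exact ⟨m, rfl⟩
  have hsperm : (PySem.List.sorted L (fun y => y) false).Perm L := PySem.List.sorted_perm L _ _
  have hsne : PySem.List.sorted L (fun y => y) false ≠ [] := by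
    intro h; exact hLne ((PySem.List.sorted_eq_nil_iff _ _ _).mp h)
  obtain ⟨a, t, hs⟩ := List.exists_cons_of_ne_nil hsne
  have hpair : (PySem.List.sorted L (fun y => y) false).Pairwise (· ≤ ·) := by
    have := PySem.List.sorted_pairwise L (fun y => y)
    simpa using this
  -- the last element of the sorted list is the maximum m
  have hlast : (PySem.List.sorted L (fun y => y) false).getLast hsne = m := by
    apply le_antisymm
    · exact PySem.List.max?_isMax hm _ (hsperm.mem_iff.mp (List.getLast_mem hsne))
    · exact pairwise_le_getLast _ hsne hpair m (hsperm.mem_iff.mpr (PySem.List.max?_mem hm))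
  simp only [hm, Option.getD_some]
  -- A side: sum + counter = grouped sum over L
  rw [sub_sub, kraft2_fold_sum m L 0 0, zero_add, zero_add]
  -- B side
  have hget0 : (PySem.List.pyGet? (PySem.List.sorted L (fun y => y) false) 0).getD 0 = a := by
    rw [hs]; simp [PySem.List.pyGet?, PySem.List.pyIdx?]
  have hgetm1 :
      (PySem.List.pyGet? (PySem.List.sorted L (fun y => y) false) (-1)).getD 0
        = (PySem.List.sorted L (fun y => y) false).getLast hsne := pyGetD_neg_one _ hsne
  have hge : ∀ x ∈ PySem.List.sorted L (fun y => y) false, a ≤ x := by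
    intro x hx
    rcases List.mem_cons.mp (hs ▸ hx) with h | h
    · exact le_of_eq h.symm
    · exact (List.pairwise_cons.mp (hs ▸ hpair)).1 x h
  rw [hget0, kraft2_alt_fold _ 0 a hsne hpair hge, hgetm1, hlast]
  simp only [zero_mul, zero_add]
  congr 1
  exact (List.Perm.sum_eq (List.Perm.map _ hsperm)).symm
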